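-- pv_equiv track=rewrite | github.com/NickScherbakov/GC-Forged-Pylot | src/core/planner.py | _parse_plan_response
-- ===== SOURCE A (Python) =====
-- from typing import Dict, List, Any, Optional, Union
--
-- def _parse_plan_response(response: str) -> List[Dict[str, Any]]:
--     """
--     Обрабатывает ответ LLM и извлекает шаги плана.
--
--     Args:
--         response: Ответ от языковой модели
--
--     Returns:
--         Список шагов плана
--     """
--     steps = []
--     current_step = {}
--     current_property = None
--
--     lines = response.strip().split("\n")
--     for line in lines:
--         line = line.strip()
--         if not line:
--             continue
--
--         # Новый шаг
--         if line.lower().startswith("step"):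
--             # Сохраняем предыдущий шаг, если есть
--             if current_step:
--                 steps.append(current_step)
--             current_step = {}
--             current_property = None
--             continue
--
--         # Свойства шага
--         if line.startswith("TYPE:"):
--             current_step["type"] = line[len("TYPE:"):].strip()
--             current_property = "type"
--         elif line.startswith("DESCRIPTION:"):
--             current_step["description"] = line[len("DESCRIPTION:"):].strip()
--             current_property = "description"
--         elif line.startswith("INPUT:"):
--             current_step["input"] = line[len("INPUT:"):].strip()
--             current_property = "input"
--         elif line.startswith("OUTPUT_KEY:"):
--             current_step["output_key"] = line[len("OUTPUT_KEY:"):].strip()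
--             current_property = "output_key"
--         # Продолжение предыдущего свойства
--         elif current_property:
--             current_step[current_property] += " " + line
--
--     # Добавляем последний шаг
--     if current_step:
--         steps.append(current_step)
--
--     # Если план пустой, создаем default план
--     if not steps:
--         steps = [{
--             "type": "direct_response",
--             "description": "Прямой ответ на запрос",
--             "input": "Исходный запрос пользователя",
--             "output_key": "response"
--         }]
--
--     return steps
-- ===== SOURCE B (Python) =====
-- from typing import Dict, List, Any
--
-- _PROPS = (("TYPE:", "type"), ("DESCRIPTION:", "description"),
--           ("INPUT:", "input"), ("OUTPUT_KEY:", "output_key"))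
--
-- _DEFAULT_PLAN = [{
--     "type": "direct_response",
--     "description": "Прямой ответ на запрос",
--     "input": "Исходный запрос пользователя",
--     "output_key": "response"
-- }]
--
-- def _parse_block(block: List[str]) -> Dict[str, Any]:
--     step = {}
--     prop = None
--     for line in block:
--         for prefix, key in _PROPS:
--             if line.startswith(prefix):
--                 step[key] = line[len(prefix):].strip()
--                 prop = key
--                 break
--         else:
--             if prop:
--                 step[prop] += " " + line
--     return step
--
-- def _parse_plan_response(response: str) -> List[Dict[str, Any]]:
--     lines = [s for s in (l.strip() for l in response.strip().split("\n")) if s]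
--     blocks = [[]]
--     for line in lines:
--         if line.lower().startswith("step"):
--             blocks.append([])
--         else:
--             blocks[-1].append(line)
--     steps = [d for d in map(_parse_block, blocks) if d]
--     return steps or [dict(d) for d in _DEFAULT_PLAN]
-- ===== Notes on version B (the rewrite author's own statement) =====
-- stated objective: alternative
-- what changed: Replaces A's single stateful accumulator loop (steps/current_step/current_property threaded through one pass) by a two-phase group-then-map decomposition: first cut the stripped non-empty lines into blocks at header lines, then parse each block independently via a prefix table, keep the non-empty dicts, and fall back to the default plan.
import Mathlib
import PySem

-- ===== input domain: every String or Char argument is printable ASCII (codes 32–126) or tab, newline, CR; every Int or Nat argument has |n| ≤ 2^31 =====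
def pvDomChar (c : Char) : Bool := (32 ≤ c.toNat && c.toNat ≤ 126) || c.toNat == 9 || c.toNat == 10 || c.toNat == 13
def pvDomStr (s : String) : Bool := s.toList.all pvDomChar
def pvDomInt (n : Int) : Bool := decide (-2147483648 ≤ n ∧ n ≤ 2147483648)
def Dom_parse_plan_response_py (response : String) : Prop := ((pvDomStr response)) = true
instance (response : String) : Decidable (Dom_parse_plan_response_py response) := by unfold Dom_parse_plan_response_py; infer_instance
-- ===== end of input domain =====

-- B replaces A's single stateful accumulator loop by a group-then-map decomposition
-- (cut the lines into blocks at "step" headers, then parse each block from a prefix table);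
-- objective: alternative structure, same cost.

-- ===== PORT A =====
-- the default plan dict A returns for an empty parse (shared literal)
def pvDefault : PySem.Dict String String :=
  PySem.Dict.ofList [("type", "direct_response"),
                     ("description", "Прямой ответ на запрос"),
                     ("input", "Исходный запрос пользователя"),
                     ("output_key", "response")]

-- one iteration of A's loop; state = (steps, current_step, current_property)
def pvStepA (st : List (PySem.Dict String String) × PySem.Dict String String × Option String)
    (line0 : String) :
    List (PySem.Dict String String) × PySem.Dict String String × Option String :=
  let line := PySem.Str.strip line0
  if line = "" then st
  else
    let (steps, cur, prop) := st
    if PySem.Str.startswith (PySem.Str.lower line) "step" then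
      ((if cur.items ≠ [] then steps ++ [cur] else steps), PySem.Dict.empty, none)
    else if PySem.Str.startswith line "TYPE:" then
      (steps, cur.insert "type" (PySem.Str.strip (PySem.Str.slice line (some (PySem.Str.len "TYPE:")) none)), some "type")
    else if PySem.Str.startswith line "DESCRIPTION:" then
      (steps, cur.insert "description" (PySem.Str.strip (PySem.Str.slice line (some (PySem.Str.len "DESCRIPTION:")) none)), some "description")
    else if PySem.Str.startswith line "INPUT:" then
      (steps, cur.insert "input" (PySem.Str.strip (PySem.Str.slice line (some (PySem.Str.len "INPUT:")) none)), some "input")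
    else if PySem.Str.startswith line "OUTPUT_KEY:" then
      (steps, cur.insert "output_key" (PySem.Str.strip (PySem.Str.slice line (some (PySem.Str.len "OUTPUT_KEY:")) none)), some "output_key")
    else
      match prop with
      | some p => (steps, cur.modify p "" (fun v => v ++ " " ++ line), some p)
      | none => (steps, cur, prop)

-- after A's loop: append the last current_step if non-empty, default if no steps, then items
def pvFinishA (r : List (PySem.Dict String String) × PySem.Dict String String × Option String) :
    List (List (String × String)) :=
  (if (if r.2.1.items ≠ [] then r.1 ++ [r.2.1] else r.1) = [] then [pvDefault]
   else (if r.2.1.items ≠ [] then r.1 ++ [r.2.1] else r.1)).map (·.items)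

def parse_plan_response_py (response : String) : List (List (String × String)) :=
  pvFinishA (((PySem.Str.split? (PySem.Str.strip response) "\n").getD []).foldl pvStepA
    ([], PySem.Dict.empty, none))

-- ===== PORT B =====
def pvProps : List (String × String) :=
  [("TYPE:", "type"), ("DESCRIPTION:", "description"), ("INPUT:", "input"), ("OUTPUT_KEY:", "output_key")]

-- one line of _parse_block: look the prefix up in the table, else continuation
def pvParseProp (st : PySem.Dict String String × Option String) (line : String) :
    PySem.Dict String String × Option String :=
  match pvProps.find? (fun pk => PySem.Str.startswith line pk.1) with
  | some (pre, key) =>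
      (st.1.insert key (PySem.Str.strip (PySem.Str.slice line (some (PySem.Str.len pre)) none)), some key)
  | none =>
      match st.2 with
      | some p => (st.1.modify p "" (fun v => v ++ " " ++ line), some p)
      | none => st

def pvParseBlock (b : List String) : PySem.Dict String String :=
  (b.foldl pvParseProp (PySem.Dict.empty, none)).1

-- grouping pass: cut at header lines; state = (closed blocks, open block)
def pvGroup (st : List (List String) × List String) (line : String) :
    List (List String) × List String :=
  if PySem.Str.startswith (PySem.Str.lower line) "step" then (st.1 ++ [st.2], [])
  else (st.1, st.2 ++ [line])

-- after grouping: parse every block, keep the non-empty dicts, default if none, then items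
def pvFinishB (g : List (List String) × List String) : List (List (String × String)) :=
  (if ((g.1 ++ [g.2]).map pvParseBlock).filter (fun d => d.items ≠ []) = [] then [pvDefault]
   else ((g.1 ++ [g.2]).map pvParseBlock).filter (fun d => d.items ≠ [])).map (·.items)

def parse_plan_response_py_alt (response : String) : List (List (String × String)) :=
  pvFinishB (((((PySem.Str.split? (PySem.Str.strip response) "\n").getD []).map
    PySem.Str.strip).filter (· ≠ "")).foldl pvGroup ([], []))

-- ===== PRECONDITION & SPEC =====
def Spec_parse_plan_response_py (response : String) (out : List (List (String × String))) : Prop := out = parse_plan_response_py_alt response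
instance (response : String) (out : List (List (String × String))) : Decidable (Spec_parse_plan_response_py response out) := by unfold Spec_parse_plan_response_py; infer_instance

-- ===== CLAIM (what is proved, stated in full; the proofs are below) =====
def Claim_equal_parse_plan_response_py : Prop := ∀ (response : String), Dom_parse_plan_response_py response → Spec_parse_plan_response_py response (parse_plan_response_py response)

-- ===== LEMMAS AND PROOFS =====

-- A's step on an already stripped, non-empty line (proof-side normal form)
def pvCore (st : List (PySem.Dict String String) × PySem.Dict String String × Option String)
    (line : String) :
    List (PySem.Dict String String) × PySem.Dict String String × Option String :=
  if PySem.Str.startswith (PySem.Str.lower line) "step" then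
    ((if st.2.1.items ≠ [] then st.1 ++ [st.2.1] else st.1), PySem.Dict.empty, none)
  else (st.1, pvParseProp st.2 line)

lemma pvCore_pos (st : List (PySem.Dict String String) × PySem.Dict String String × Option String)
    (l : String) (h : PySem.Str.startswith (PySem.Str.lower l) "step" = true) :
    pvCore st l = ((if st.2.1.items ≠ [] then st.1 ++ [st.2.1] else st.1), PySem.Dict.empty, none) := by
  simp only [pvCore]; rw [if_pos h]

lemma pvCore_neg (st : List (PySem.Dict String String) × PySem.Dict String String × Option String)
    (l : String) (h : ¬ PySem.Str.startswith (PySem.Str.lower l) "step" = true) :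
    pvCore st l = (st.1, pvParseProp st.2 l) := by
  simp only [pvCore]; rw [if_neg h]

lemma pvGroup_pos (st : List (List String) × List String) (l : String)
    (h : PySem.Str.startswith (PySem.Str.lower l) "step" = true) :
    pvGroup st l = (st.1 ++ [st.2], []) := by
  simp only [pvGroup]; rw [if_pos h]

lemma pvGroup_neg (st : List (List String) × List String) (l : String)
    (h : ¬ PySem.Str.startswith (PySem.Str.lower l) "step" = true) :
    pvGroup st l = (st.1, st.2 ++ [l]) := by
  simp only [pvGroup]; rw [if_neg h]

-- B's table lookup written as A's elif chain
lemma pvParseProp_chain (d : PySem.Dict String String) (p : Option String) (l : String) :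
    pvParseProp (d, p) l =
      if PySem.Str.startswith l "TYPE:" then
        (d.insert "type" (PySem.Str.strip (PySem.Str.slice l (some (PySem.Str.len "TYPE:")) none)), some "type")
      else if PySem.Str.startswith l "DESCRIPTION:" then
        (d.insert "description" (PySem.Str.strip (PySem.Str.slice l (some (PySem.Str.len "DESCRIPTION:")) none)), some "description")
      else if PySem.Str.startswith l "INPUT:" then
        (d.insert "input" (PySem.Str.strip (PySem.Str.slice l (some (PySem.Str.len "INPUT:")) none)), some "input")
      else if PySem.Str.startswith l "OUTPUT_KEY:" then
        (d.insert "output_key" (PySem.Str.strip (PySem.Str.slice l (some (PySem.Str.len "OUTPUT_KEY:")) none)), some "output_key")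
      else
        match p with
        | some q => (d.modify q "" (fun v => v ++ " " ++ l), some q)
        | none => (d, p) := by
  simp only [pvParseProp, pvProps, List.find?]
  cases h2 : PySem.Str.startswith l "TYPE:" <;> simp only []
  · cases h3 : PySem.Str.startswith l "DESCRIPTION:" <;> simp only []
    · cases h4 : PySem.Str.startswith l "INPUT:" <;> simp only []
      · cases h5 : PySem.Str.startswith l "OUTPUT_KEY:" <;> simp only []
        · cases p <;> rfl
        · rfl
      · rfl
    · rfl
  · rfl

-- A's step equals: skip blank, otherwise pvCore on the stripped line
lemma pvStepA_eq (st : List (PySem.Dict String String) × PySem.Dict String String × Option String)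
    (l : String) :
    pvStepA st l = if PySem.Str.strip l = "" then st else pvCore st (PySem.Str.strip l) := by
  obtain ⟨steps, cur, prop⟩ := st
  by_cases h0 : PySem.Str.strip l = ""
  · simp only [pvStepA, h0]
    rfl
  · simp only [pvStepA]
    rw [if_neg h0, if_neg h0]
    by_cases h1 : PySem.Str.startswith (PySem.Str.lower (PySem.Str.strip l)) "step" = true
    · rw [pvCore_pos _ _ h1]
      rw [if_pos h1]
    · rw [pvCore_neg _ _ h1]
      rw [if_neg h1, pvParseProp_chain]
      by_cases h2 : PySem.Str.startswith (PySem.Str.strip l) "TYPE:" = true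
      · rw [if_pos h2, if_pos h2]
      · rw [if_neg h2, if_neg h2]
        by_cases h3 : PySem.Str.startswith (PySem.Str.strip l) "DESCRIPTION:" = true
        · rw [if_pos h3, if_pos h3]
        · rw [if_neg h3, if_neg h3]
          by_cases h4 : PySem.Str.startswith (PySem.Str.strip l) "INPUT:" = true
          · rw [if_pos h4, if_pos h4]
          · rw [if_neg h4, if_neg h4]
            by_cases h5 : PySem.Str.startswith (PySem.Str.strip l) "OUTPUT_KEY:" = true
            · rw [if_pos h5, if_pos h5]
            · rw [if_neg h5, if_neg h5]
              cases prop <;> rfl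

-- A's fold over raw lines equals the fold of pvCore over the stripped non-empty lines
lemma foldl_stepA_eq (ls : List String)
    (st : List (PySem.Dict String String) × PySem.Dict String String × Option String) :
    ls.foldl pvStepA st = ((ls.map PySem.Str.strip).filter (· ≠ "")).foldl pvCore st := by
  induction ls generalizing st with
  | nil => rfl
  | cons l ls ih =>
      simp only [List.foldl_cons, List.map_cons, List.filter_cons, pvStepA_eq]
      by_cases h : PySem.Str.strip l = "" <;> simp [h, ih]

-- the closed blocks accumulated so far are a prefix the grouping fold only extends
lemma pvGroup_gen (ls : List String) (d : List (List String)) (c : List String) :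
    ls.foldl pvGroup (d, c) =
      (d ++ (ls.foldl pvGroup ([], c)).1, (ls.foldl pvGroup ([], c)).2) := by
  induction ls generalizing d c with
  | nil => simp
  | cons l ls ih =>
      rw [List.foldl_cons, List.foldl_cons]
      by_cases h : PySem.Str.startswith (PySem.Str.lower l) "step" = true
      · rw [pvGroup_pos _ _ h, pvGroup_pos _ _ h]
        rw [ih (d ++ [c]) [], ih ([] ++ [c]) []]
        simp [List.append_assoc]
      · rw [pvGroup_neg _ _ h, pvGroup_neg _ _ h]
        exact ih d (c ++ [l])

def pvFinA (st : List (PySem.Dict String String) × PySem.Dict String String × Option String) :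
    List (PySem.Dict String String) :=
  if st.2.1.items ≠ [] then st.1 ++ [st.2.1] else st.1

-- main invariant: A's loop (pvCore) from the state generated by the open block b
-- produces exactly B's group-then-map result
lemma main_inv (ls : List String) (steps : List (PySem.Dict String String)) (b : List String) :
    pvFinA (ls.foldl pvCore (steps, b.foldl pvParseProp (PySem.Dict.empty, none)))
      = steps ++ ((((ls.foldl pvGroup ([], b)).1 ++ [(ls.foldl pvGroup ([], b)).2]).map
          pvParseBlock).filter (fun d => d.items ≠ [])) := by
  induction ls generalizing steps b with
  | nil =>
      simp only [List.foldl_nil, pvFinA, List.nil_append, List.map_cons, List.map_nil,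
        List.filter]
      by_cases hb : (b.foldl pvParseProp (PySem.Dict.empty, none)).1.items = [] <;>
        simp [pvParseBlock, hb]
  | cons l ls ih =>
      rw [List.foldl_cons, List.foldl_cons]
      by_cases h : PySem.Str.startswith (PySem.Str.lower l) "step" = true
      · rw [pvCore_pos _ _ h, pvGroup_pos _ _ h]
        simp only [List.nil_append]

        have key := ih (if (b.foldl pvParseProp (PySem.Dict.empty, none)).1.items ≠ [] then
            steps ++ [(b.foldl pvParseProp (PySem.Dict.empty, none)).1] else steps) []
        simp only [List.foldl_nil] at key
        rw [key, pvGroup_gen ls [b] []]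
        by_cases hb : (b.foldl pvParseProp (PySem.Dict.empty, none)).1.items = [] <;>
          simp [pvParseBlock, hb, List.filter_append, List.append_assoc]
      · rw [pvCore_neg _ _ h, pvGroup_neg _ _ h]
        have hstep : pvParseProp (b.foldl pvParseProp (PySem.Dict.empty, none)) l
            = (b ++ [l]).foldl pvParseProp (PySem.Dict.empty, none) := by
          rw [List.foldl_append]; rfl
        rw [hstep]
        exact ih steps (b ++ [l])

-- ===== VERDICT (by name: the statement is the Claim_ definition above) =====
set_option maxHeartbeats 1000000 in
theorem parse_plan_response_py_spec : Claim_equal_parse_plan_response_py := by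
  intro response _
  show parse_plan_response_py response = parse_plan_response_py_alt response
  unfold parse_plan_response_py parse_plan_response_py_alt
  rw [foldl_stepA_eq]
  have key := main_inv ((((PySem.Str.split? (PySem.Str.strip response) "\n").getD []).map
      PySem.Str.strip).filter (· ≠ "")) [] []
  rw [List.foldl_nil, List.nil_append] at key
  unfold pvFinA at key
  unfold pvFinishA pvFinishB
  rw [key]
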